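-- pv_equiv track=rewrite | github.com/pypi-data/pypi-mirror-403 | packages/hcs-core/hcs_core-0.1.321.tar.gz/hcs_core-0.1.321/hcs_core/ctxp/logger.py | _shorten_package_name
-- ===== SOURCE A (Python) =====
-- def _shorten_package_name(package_name, max_length):
--     if len(package_name) <= max_length:
--         return package_name
--
--     parts = package_name.split(".")
--     shortened_parts = []
--
--     for i, part in enumerate(parts):
--         shortened_parts.append(part[0])
--
--         if i == len(parts) - 1:
--             # Last package name
--             remaining_length = max_length - len(".".join(shortened_parts))
--             if len(part) > remaining_length:
--                 shortened_parts[-1] = "..." + part[-remaining_length + 3 :]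
--             else:
--                 shortened_parts[-1] = part
--         else:
--             new_package_name = ".".join(shortened_parts)
--
--             if len(new_package_name) + len(parts) - i - 1 > max_length:
--                 break
--
--     return ".".join(shortened_parts)
-- ===== SOURCE B (Python) =====
-- def _shorten_package_name(package_name, max_length):
--     if len(package_name) <= max_length:
--         return package_name
--
--     parts = package_name.split(".")
--     n = len(parts)
--     # After abbreviating parts[0..i] to first letters, the join has length 2*i+1,
--     # so A's break test is equivalent to: i + n > max_length.
--     cut = max(0, max_length - n + 1)
--     if cut <= n - 2:
--         return ".".join(p[0] for p in parts[: cut + 1])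
--
--     last = parts[-1]
--     prefix = [p[0] for p in parts[:-1]]
--     remaining = max_length - (2 * n - 1)
--     if len(last) > remaining:
--         return ".".join(prefix + ["..." + last[3 - remaining:]])
--     return ".".join(prefix + [last])
-- ===== Notes on version B (the rewrite author's own statement) =====
-- stated objective: simpler
-- what changed: B replaces A's element-by-element loop that appends a first letter, re-joins and re-measures the accumulator at every step by a direct computation of the break index from the identity len(join)=2*i+1, then builds the result in one join.
import Mathlib
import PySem

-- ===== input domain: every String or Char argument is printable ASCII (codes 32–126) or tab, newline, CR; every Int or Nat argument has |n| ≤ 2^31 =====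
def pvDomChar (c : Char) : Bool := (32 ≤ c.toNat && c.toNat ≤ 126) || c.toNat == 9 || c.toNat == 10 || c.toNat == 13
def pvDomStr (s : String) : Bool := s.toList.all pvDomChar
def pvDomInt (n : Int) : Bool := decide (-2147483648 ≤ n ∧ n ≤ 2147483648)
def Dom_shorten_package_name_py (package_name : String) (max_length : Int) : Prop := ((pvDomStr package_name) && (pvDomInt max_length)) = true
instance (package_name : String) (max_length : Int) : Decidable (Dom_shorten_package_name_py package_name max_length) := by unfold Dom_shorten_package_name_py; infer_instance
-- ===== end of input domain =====

-- B replaces A's element-by-element loop (append first letter, re-join, re-measure) by a direct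
-- computation of the break index from the identity len(join) = 2*i+1; objective: simpler/alternative.

-- ===== PORT A =====
-- part[0] as a 1-char string; Python raises IndexError on "" (excluded by Pre_), default "" unused inside Pre_
def pvFirst (s : String) : String := ((PySem.Str.pyGet? s 0).map Char.toString).getD ""

-- the 'for i, part in enumerate(parts)' loop of A; acc = shortened_parts
def pvALoop (max_length : Int) (n : Nat) : List String → Nat → List String → List String
  | [], _, acc => acc
  | part :: rest, i, acc =>
    let acc' := acc ++ [pvFirst part]
    if i = n - 1 then
      let remaining := max_length - PySem.Str.len (PySem.Str.join "." acc')
      if PySem.Str.len part > remaining then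
        PySem.List.pySetD acc' (-1) ("..." ++ PySem.Str.slice part (some (-remaining + 3)) none)
      else
        PySem.List.pySetD acc' (-1) part
    else
      if PySem.Str.len (PySem.Str.join "." acc') + (n : Int) - (i : Int) - 1 > max_length then
        acc'  -- break
      else
        pvALoop max_length n rest (i + 1) acc'

def shorten_package_name_py (package_name : String) (max_length : Int) : String :=
  if PySem.Str.len package_name ≤ max_length then package_name
  else
    let parts := (PySem.Str.split? package_name ".").getD []
    PySem.Str.join "." (pvALoop max_length parts.length parts 0 [])

-- ===== PORT B =====
-- the body of B after the initial length guard
def pvB (parts : List String) (max_length : Int) : String :=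
  let n : Int := parts.length
  let cut : Int := max 0 (max_length - n + 1)
  if cut ≤ n - 2 then
    PySem.Str.join "." ((PySem.List.slice parts none (some (cut + 1))).map pvFirst)
  else
    let last := (PySem.List.pyGet? parts (-1)).getD ""
    let pre := (PySem.List.slice parts none (some (-1))).map pvFirst
    let remaining := max_length - (2 * n - 1)
    if PySem.Str.len last > remaining then
      PySem.Str.join "." (pre ++ ["..." ++ PySem.Str.slice last (some (3 - remaining)) none])
    else
      PySem.Str.join "." (pre ++ [last])

def shorten_package_name_py_alt (package_name : String) (max_length : Int) : String :=
  if PySem.Str.len package_name ≤ max_length then package_name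
  else pvB ((PySem.Str.split? package_name ".").getD []) max_length

-- ===== PRECONDITION & SPEC =====
-- Pre_ excludes exactly the inputs on which A raises IndexError ('' [0]): an empty dotted part
-- among the parts A's loop actually visits (index ≤ min(n-1, max(0, max_length-n+1))).
def Pre_shorten_package_name_py (package_name : String) (max_length : Int) : Prop :=
  PySem.Str.len package_name ≤ max_length ∨
    (∀ s ∈ (let parts := (PySem.Str.split? package_name ".").getD []
            parts.take ((min ((parts.length : Int) - 1)
              (max 0 (max_length - parts.length + 1))).toNat + 1)), s ≠ "")
instance (package_name : String) (max_length : Int) : Decidable (Pre_shorten_package_name_py package_name max_length) := by unfold Pre_shorten_package_name_py; infer_instance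

def pvWitness_shorten_package_name_py : String × Int := ("hcs_core.ctxp.logger", 10)

def Spec_shorten_package_name_py (package_name : String) (max_length : Int) (out : String) : Prop := out = shorten_package_name_py_alt package_name max_length
instance (package_name : String) (max_length : Int) (out : String) : Decidable (Spec_shorten_package_name_py package_name max_length out) := by unfold Spec_shorten_package_name_py; infer_instance

-- ===== CLAIM (what is proved, stated in full; the proofs are below) =====
def Claim_equal_shorten_package_name_py : Prop := ∀ (package_name : String) (max_length : Int), Dom_shorten_package_name_py package_name max_length → Pre_shorten_package_name_py package_name max_length → Spec_shorten_package_name_py package_name max_length (shorten_package_name_py package_name max_length)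

-- ===== LEMMAS AND PROOFS =====

-- a nonempty string's first letter is a 1-char string
lemma pvFirst_len {s : String} (h : s ≠ "") : PySem.Str.len (pvFirst s) = 1 := by
  obtain ⟨c, t, hct⟩ := List.exists_cons_of_ne_nil (fun hn => h (String.toList_eq_nil_iff.mp hn))
  simp [pvFirst, hct, PySem.Str.len_eq]

-- length of '.'-join of 1-char strings
-- length of '.'-join on the Chars side
lemma pvJoinChars_len : ∀ (L : List (List Char)), L ≠ [] → (∀ cs ∈ L, cs.length = 1) →
    (PySem.Chars.join ['.'] L).length = 2 * L.length - 1
  | [], h, _ => absurd rfl h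
  | [a], _, h1 => by simp [PySem.Chars.join_singleton, h1 a (by simp)]
  | a :: b :: r, _, h1 => by
    have ih := pvJoinChars_len (b :: r) (by simp) (fun cs hcs => h1 cs (by simp [hcs]))
    rw [PySem.Chars.join_cons_cons]
    simp only [List.length_append, List.length_cons, ih, h1 a (by simp)]
    simp
    omega

lemma pvJoin_len (l : List String) (hne : l ≠ []) (h1 : ∀ s ∈ l, PySem.Str.len s = 1) :
    PySem.Str.len (PySem.Str.join "." l) = 2 * (l.length : Int) - 1 := by
  have := pvJoinChars_len (l.map String.toList) (by simpa using hne)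
    (by intro cs hcs
        obtain ⟨s, hs, rfl⟩ := List.mem_map.mp hcs
        have := h1 s hs
        rw [PySem.Str.len_eq] at this
        exact_mod_cast this)
  rw [PySem.Str.len_eq]
  rw [show (PySem.Str.join "." l).toList = PySem.Chars.join ['.'] (l.map String.toList) from by
    simp [PySem.Str.toList_join]]
  rw [this]
  have hlen : 1 ≤ l.length := List.length_pos_iff.mpr hne
  simp only [List.length_map]
  omega

-- shortened_parts[-1] = x on a snoc list
lemma pvSet_last {α : Type} (l : List α) (y x : α) :
    PySem.List.pySetD (l ++ [y]) (-1) x = l ++ [x] := by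
  simp [PySem.List.pySetD, PySem.List.pySet?, PySem.List.pyIdx?]

-- split never returns []
lemma pvSplitGo_ne_nil (sep : List Char) : ∀ (fuel : Nat) (l cur : List Char) (acc : List (List Char)),
    PySem.Chars.splitOn.go sep fuel l cur acc ≠ []
  | 0, l, cur, acc => by simp [PySem.Chars.splitOn.go]
  | fuel + 1, [], cur, acc => by simp [PySem.Chars.splitOn.go]
  | fuel + 1, c :: rest, cur, acc => by
    rw [PySem.Chars.splitOn.go]
    split
    · exact pvSplitGo_ne_nil sep fuel _ _ _
    · exact pvSplitGo_ne_nil sep fuel _ _ _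

lemma pvSplit_ne_nil (s : String) : (PySem.Str.split? s ".").getD [] ≠ [] := by
  simp [PySem.Str.split?, PySem.Chars.split?, PySem.Chars.splitOn]
  exact pvSplitGo_ne_nil _ _ _ _ _

-- the loop, entered at index i with no break so far, computes pvB
lemma pvALoop_eq (maxL : Int) : ∀ (rest : List String) (i : Nat) (parts : List String),
    parts.drop i = rest → rest ≠ [] →
    (∀ j : Nat, j < i → (j : Int) + parts.length ≤ maxL) →
    (∀ s ∈ parts.take ((min ((parts.length : Int) - 1)
        (max 0 (maxL - parts.length + 1))).toNat + 1), s ≠ "") →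
    PySem.Str.join "." (pvALoop maxL parts.length rest i ((parts.take i).map pvFirst))
      = pvB parts maxL := by
  intro rest
  induction rest with
  | nil => intro _ _ _ h; exact absurd rfl h
  | cons part rest' ih =>
    intro i parts hdrop hne hnb hpre
    clear hne
    have hi : i < parts.length := by
      by_contra h
      rw [List.drop_eq_nil_of_le (by omega)] at hdrop
      exact List.cons_ne_nil _ _ hdrop.symm
    have hpi : parts[i]? = some part := by
      have : (parts.drop i)[0]? = some part := by rw [hdrop]; rfl
      simpa using this
    have hdrop1 : parts.drop (i + 1) = rest' := by
      have : List.drop 1 (parts.drop i) = rest' := by rw [hdrop]; rfl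
      rwa [List.drop_drop] at this
    have htake1 : parts.take (i + 1) = parts.take i ++ [part] := by
      rw [List.take_add_one, hpi]; rfl
    have hmap : (parts.take i).map pvFirst ++ [pvFirst part]
        = (parts.take (i + 1)).map pvFirst := by
      rw [htake1]; simp
    set n := parts.length with hn
    -- the parts visited so far are nonempty
    have hvis : ∀ s ∈ parts.take (i + 1), s ≠ "" := by
      have hle : (i : Int) ≤ min ((n : Int) - 1) (max 0 (maxL - n + 1)) := by
        rcases Nat.eq_zero_or_pos i with rfl | hpos
        · simp
          omega
        · have h3 := hnb (i - 1) (by omega)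
          have hc : ((i - 1 : Nat) : Int) = (i : Int) - 1 := by push_cast [hpos]; ring
          rw [hc] at h3
          omega
      intro s hs
      apply hpre s
      have hmin : List.take (i + 1) parts
          = List.take (i + 1) (List.take ((min ((n : Int) - 1) (max 0 (maxL - n + 1))).toNat + 1) parts) := by
        rw [List.take_take]
        congr 1
        omega
      exact List.take_subset _ _ (hmin ▸ hs)
    have hacc1 : ∀ s ∈ (parts.take (i + 1)).map pvFirst, PySem.Str.len s = 1 := by
      intro s hs
      obtain ⟨t, ht, rfl⟩ := List.mem_map.mp hs
      exact pvFirst_len (hvis t ht)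
    have hjlen : PySem.Str.len (PySem.Str.join "." ((parts.take i).map pvFirst ++ [pvFirst part]))
        = 2 * (i : Int) + 1 := by
      rw [hmap, pvJoin_len _ (by simp [htake1]) hacc1]
      simp [List.length_take]
      omega
    rcases List.eq_nil_or_concat' rest' with rfl | hconc
    · -- last part: i = n - 1
      have hin : i + 1 = n := by
        have := List.drop_eq_nil_iff.mp hdrop1
        omega
      simp only [pvALoop, if_pos (by omega : i = n - 1)]
      have haccall : (parts.take i).map pvFirst ++ [pvFirst part] = parts.map pvFirst := by
        rw [hmap, hin, List.take_length]
      have hsnoc : parts = parts.take i ++ [part] := by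
        conv_lhs => rw [← List.take_append_drop i parts, hdrop]
      -- B takes the last-part branch
      have hcut : ¬ (max 0 (maxL - (n : Int) + 1) ≤ (n : Int) - 2) := by
        by_cases h2 : 2 ≤ n
        · have h3 := hnb (n - 2) (by omega)
          have hc : ((n - 2 : Nat) : Int) = (n : Int) - 2 := by push_cast [h2]; ring
          rw [hc] at h3
          omega
        · omega
      rw [pvB]
      simp only [← hn, hcut, if_false]
      have hlastB : (PySem.List.pyGet? parts (-1)).getD "" = part := by
        rw [hsnoc, PySem.List.pyGet?_neg_one_append_singleton]; rfl
      have hpreB : (PySem.List.slice parts none (some (-1))).map pvFirst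
          = (parts.take i).map pvFirst := by
        rw [PySem.List.slice_to_neg_one]
        conv_lhs => rw [hsnoc]
        rw [List.dropLast_concat]
      rw [hlastB, hpreB, hjlen]
      have hrem : maxL - (2 * (i : Int) + 1) = maxL - (2 * (n : Int) - 1) := by omega
      rw [hrem]
      by_cases hc : PySem.Str.len part > maxL - (2 * (n : Int) - 1)
      · rw [if_pos hc, if_pos hc, pvSet_last]
        rw [show -(maxL - (2 * (n : Int) - 1)) + 3 = 3 - (maxL - (2 * (n : Int) - 1)) from by ring]
      · rw [if_neg hc, if_neg hc, pvSet_last]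
    · -- not the last part: i + 1 < n
      have hrest' : rest' ≠ [] := by obtain ⟨_, _, rfl⟩ := hconc; simp
      have hin : i + 1 < n := by
        rcases Nat.lt_or_ge (i + 1) n with h | h
        · exact h
        · rw [List.drop_eq_nil_of_le h] at hdrop1
          exact absurd hdrop1.symm hrest'
      simp only [pvALoop, if_neg (by omega : ¬ i = n - 1)]
      rw [hjlen]
      by_cases hbr : 2 * (i : Int) + 1 + (n : Int) - (i : Int) - 1 > maxL
      · rw [if_pos hbr]
        -- B breaks at cut = i
        have hcuti : max 0 (maxL - (n : Int) + 1) = (i : Int) := by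
          rcases Nat.eq_zero_or_pos i with rfl | hpos
          · simp
            omega
          · have h3 := hnb (i - 1) (by omega)
            have hc : ((i - 1 : Nat) : Int) = (i : Int) - 1 := by push_cast [hpos]; ring
            rw [hc] at h3
            omega
        rw [pvB]
        simp only [← hn, hcuti]
        rw [if_pos (by omega : (i : Int) ≤ (n : Int) - 2)]
        have hslice : PySem.List.slice parts none (some ((i : Int) + 1)) = parts.take (i + 1) := by
          have hcast : (i : Int) + 1 = ((i + 1 : Nat) : Int) := by push_cast; ring
          rw [hcast, PySem.List.slice_to_natCast]
        rw [hslice, hmap]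
      · rw [if_neg hbr]
        have hrec := ih (i + 1) parts hdrop1 hrest'
          (by intro j hj
              rcases Nat.lt_or_ge j i with h | h
              · exact hnb j h
              · have : j = i := by omega
                subst this
                omega)
          hpre
        rw [← hn] at hrec
        rw [hmap]
        exact hrec

-- ===== VERDICT (by name: the statement is the Claim_ definition above) =====
theorem shorten_package_name_py_spec : Claim_equal_shorten_package_name_py := by
  intro pn maxL _ hpre
  unfold Spec_shorten_package_name_py shorten_package_name_py shorten_package_name_py_alt
  by_cases hle : PySem.Str.len pn ≤ maxL
  · rw [if_pos hle, if_pos hle]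
  · rw [if_neg hle, if_neg hle]
    rcases hpre with h | h
    · exact absurd h hle
    · exact pvALoop_eq maxL ((PySem.Str.split? pn ".").getD []) 0 _ rfl (pvSplit_ne_nil pn)
        (by intro j hj; omega) h
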